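-- pv_equiv track=rewrite | github.com/GregoryHue/SudokuSolver | app/src/controller.py | IsOnlySuggestionInSquare
-- ===== SOURCE A (Python) =====
-- def IsOnlySuggestionInSquare(possibilities, possibility, line, column):
--     same_suggestion_found = 0
--     limits = []
--
--     x_line = 0
--     y_line = 2
--     while not limits:
--         if x_line <= line <= y_line:
--             x_col = 0
--             y_col = 2
--             while not limits:
--                 if x_col <= column <= y_col:
--                     limits = [x_line, y_line, x_col, y_col]
--                 x_col += 3
--                 y_col += 3
--         x_line += 3
--         y_line += 3
--
--     for row in possibilities:
--         for original_sug in possibilities[row]: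
--             if limits[0] <= row[0] <= limits[1] and limits[2] <= row[1] <= limits[3] and original_sug == possibility:
--                 same_suggestion_found += 1
--
--     if same_suggestion_found == 1:
--         return True
--     return False
-- ===== SOURCE B (Python) =====
-- def IsOnlySuggestionInSquare(possibilities, possibility, line, column):
--     base_r = line // 3 * 3
--     base_c = column // 3 * 3
--     count = 0
--     for r in range(base_r, base_r + 3):
--         for c in range(base_c, base_c + 3):
--             count += possibilities.get((r, c), []).count(possibility)
--     return count == 1
-- ===== Notes on version B (the rewrite author's own statement) =====
-- stated objective: faster
-- what changed: Instead of locating the block limits with an incrementing while loop and then scanning every dict entry against those bounds, B computes the block origin by integer division and directly looks up only the 9 cells of the block, counting the suggestion in each.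
import Mathlib
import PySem

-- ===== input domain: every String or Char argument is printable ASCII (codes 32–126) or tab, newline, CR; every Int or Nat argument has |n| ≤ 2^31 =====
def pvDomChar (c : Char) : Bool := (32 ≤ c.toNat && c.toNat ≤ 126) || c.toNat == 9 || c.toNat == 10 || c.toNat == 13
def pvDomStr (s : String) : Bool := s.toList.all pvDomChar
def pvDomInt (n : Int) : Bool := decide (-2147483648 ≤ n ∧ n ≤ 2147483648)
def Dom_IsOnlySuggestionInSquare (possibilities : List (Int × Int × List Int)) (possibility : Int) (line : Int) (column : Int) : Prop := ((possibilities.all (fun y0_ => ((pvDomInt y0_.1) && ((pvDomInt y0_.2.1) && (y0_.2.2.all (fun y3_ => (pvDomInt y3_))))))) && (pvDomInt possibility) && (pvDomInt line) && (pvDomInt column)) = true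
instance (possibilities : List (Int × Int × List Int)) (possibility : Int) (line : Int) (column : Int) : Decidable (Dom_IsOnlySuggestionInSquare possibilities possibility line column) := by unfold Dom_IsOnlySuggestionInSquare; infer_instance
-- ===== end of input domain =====

-- B replaces A's while-loop limit search + full scan of all dict entries by a direct
-- integer-division block origin and lookups of exactly the 9 block cells (objective: simpler).

-- ===== PORT A =====
-- A's `while not limits` search: advance x by 3 until x ≤ target ≤ x + 2; fuel makes the
-- same computation total (A loops forever when target < 0 — excluded by Pre_).
def pvBlockLoop (target : Int) : Nat → Int → Option Int
  | 0, _ => none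
  | fuel + 1, x => if x ≤ target ∧ target ≤ x + 2 then some x else pvBlockLoop target fuel (x + 3)

def IsOnlySuggestionInSquare (possibilities : List (Int × Int × List Int)) (possibility : Int) (line : Int) (column : Int) : Bool :=
  match pvBlockLoop line (line.toNat + 1) 0, pvBlockLoop column (column.toNat + 1) 0 with
  | some xl, some xc =>
      let d := PySem.Dict.ofList (possibilities.map (fun e => ((e.1, e.2.1), e.2.2)))
      let cnt : Int := d.items.foldl (fun acc kv =>
          kv.2.foldl (fun a s =>
            if xl ≤ kv.1.1 ∧ kv.1.1 ≤ xl + 2 ∧ xc ≤ kv.1.2 ∧ kv.1.2 ≤ xc + 2 ∧ s = possibility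
            then a + 1 else a) acc) 0
      cnt == 1
  | _, _ => false

-- ===== PORT B =====
def IsOnlySuggestionInSquare_alt (possibilities : List (Int × Int × List Int)) (possibility : Int) (line : Int) (column : Int) : Bool :=
  let d := PySem.Dict.ofList (possibilities.map (fun e => ((e.1, e.2.1), e.2.2)))
  let baseR := PySem.Int.floordiv line 3 * 3
  let baseC := PySem.Int.floordiv column 3 * 3
  let cnt : Int := (PySem.List.pyRange baseR (baseR + 3) 1).foldl (fun acc r =>
      (PySem.List.pyRange baseC (baseC + 3) 1).foldl (fun acc2 c =>
        acc2 + ((d.getD (r, c) []).count possibility : Int)) acc) 0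
  cnt == 1

-- ===== PRECONDITION & SPEC =====
-- A's while loops never terminate when line or column is negative; Pre_ keeps exactly
-- the inputs where Python A returns.
def Pre_IsOnlySuggestionInSquare (possibilities : List (Int × Int × List Int)) (possibility : Int) (line : Int) (column : Int) : Prop := 0 ≤ line ∧ 0 ≤ column
instance (possibilities : List (Int × Int × List Int)) (possibility : Int) (line : Int) (column : Int) : Decidable (Pre_IsOnlySuggestionInSquare possibilities possibility line column) := by unfold Pre_IsOnlySuggestionInSquare; infer_instance

def pvWitness_IsOnlySuggestionInSquare : (List (Int × Int × List Int)) × Int × Int × Int := ([(0, 0, [5, 2]), (4, 4, [5])], 5, 1, 2)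

def Spec_IsOnlySuggestionInSquare (possibilities : List (Int × Int × List Int)) (possibility : Int) (line : Int) (column : Int) (out : Bool) : Prop := out = IsOnlySuggestionInSquare_alt possibilities possibility line column
instance (possibilities : List (Int × Int × List Int)) (possibility : Int) (line : Int) (column : Int) (out : Bool) : Decidable (Spec_IsOnlySuggestionInSquare possibilities possibility line column out) := by unfold Spec_IsOnlySuggestionInSquare; infer_instance

-- ===== CLAIM (what is proved, stated in full; the proofs are below) =====
def Claim_equal_IsOnlySuggestionInSquare : Prop := ∀ (possibilities : List (Int × Int × List Int)) (possibility : Int) (line : Int) (column : Int), Dom_IsOnlySuggestionInSquare possibilities possibility line column → Pre_IsOnlySuggestionInSquare possibilities possibility line column → Spec_IsOnlySuggestionInSquare possibilities possibility line column (IsOnlySuggestionInSquare possibilities possibility line column)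

-- ===== LEMMAS AND PROOFS =====

theorem pvWitness_ok : Dom_IsOnlySuggestionInSquare pvWitness_IsOnlySuggestionInSquare.1 pvWitness_IsOnlySuggestionInSquare.2.1 pvWitness_IsOnlySuggestionInSquare.2.2.1 pvWitness_IsOnlySuggestionInSquare.2.2.2 ∧ Pre_IsOnlySuggestionInSquare pvWitness_IsOnlySuggestionInSquare.1 pvWitness_IsOnlySuggestionInSquare.2.1 pvWitness_IsOnlySuggestionInSquare.2.2.1 pvWitness_IsOnlySuggestionInSquare.2.2.2 := by
  constructor <;> decide

-- A's while loop lands on the multiple of 3 at or below the target.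
theorem pvBlockLoop_eq (t : Int) : ∀ (fuel : Nat) (x : Int), 0 ≤ t - x → t - x < 3 * fuel →
    pvBlockLoop t fuel x = some (x + 3 * ((t - x) / 3)) := by
  intro fuel
  induction fuel with
  | zero => intro x h1 h2; omega
  | succ n ih =>
    intro x h1 h2
    by_cases h : x ≤ t ∧ t ≤ x + 2
    · simp only [pvBlockLoop, if_pos h]
      congr 1
      omega
    · simp only [pvBlockLoop, if_neg h]
      rw [ih (x + 3) (by omega) (by omega)]
      congr 1
      omega

theorem pvBlockLoop_start (t : Int) (ht : 0 ≤ t) :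
    pvBlockLoop t (t.toNat + 1) 0 = some (3 * (t / 3)) := by
  rw [pvBlockLoop_eq t (t.toNat + 1) 0 (by omega) (by omega)]
  congr 1
  omega

theorem sum_ite_eq_mem (k0 : Int × Int) (v : Int) : ∀ (L : List (Int × Int)), L.Nodup →
    (L.map (fun k => if k = k0 then v else 0)).sum = if k0 ∈ L then v else 0 := by
  intro L
  induction L with
  | nil => simp
  | cons a L ih =>
    intro hnd
    rcases List.nodup_cons.mp hnd with ⟨ha, hL⟩
    by_cases hak : a = k0
    · subst hak
      have : (L.map (fun k => if k = a then v else 0)).sum = 0 := by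
        apply List.sum_eq_zero
        intro x hx
        rcases List.mem_map.mp hx with ⟨k, hk, rfl⟩
        simp [show k ≠ a from fun h => ha (h ▸ hk)]
      simp [this]
    · simp only [List.map_cons, List.sum_cons, if_neg hak, ih hL, List.mem_cons]
      simp [Ne.symm hak]

-- counting over the looked-up cells of L equals the filtered scan over the dict's items
theorem sum_getD_eq_items (p : Int) : ∀ (l : List ((Int × Int) × List Int)) (L : List (Int × Int)),
    (l.map Prod.fst).Nodup → L.Nodup →
    (L.map (fun k => (((PySem.Dict.mk l).getD k []).count p : Int))).sum
      = (l.map (fun kv => if kv.1 ∈ L then (kv.2.count p : Int) else 0)).sum := by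
  intro l
  induction l with
  | nil =>
    intro L _ _
    simp [PySem.Dict.getD, PySem.Dict.get?]
  | cons kv0 rest ih =>
    intro L hnd hL
    rcases List.nodup_cons.mp hnd with ⟨hk0, hrest⟩
    have hget : ∀ k, ((PySem.Dict.mk (kv0 :: rest)).getD k []) =
        if k = kv0.1 then kv0.2 else (PySem.Dict.mk rest).getD k [] := by
      intro k
      rw [PySem.Dict.getD_eq_get?_getD, PySem.Dict.get?_mk_cons]
      by_cases hk : kv0.1 = k
      · simp [hk]
      · simp [hk, Ne.symm hk, PySem.Dict.getD_eq_get?_getD]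
    have hrest0 : (PySem.Dict.mk rest).getD kv0.1 [] = [] := by
      apply PySem.Dict.getD_of_get?_eq_none
      rw [PySem.Dict.get?_eq_none_iff_not_mem_keys]
      exact hk0
    have hpt : ∀ k, (((PySem.Dict.mk (kv0 :: rest)).getD k []).count p : Int)
        = (if k = kv0.1 then (kv0.2.count p : Int) else 0)
          + (((PySem.Dict.mk rest).getD k []).count p : Int) := by
      intro k
      rw [hget k]
      by_cases hk : k = kv0.1
      · simp [hk, hrest0]
      · simp [hk]
    calc (L.map (fun k => ((((PySem.Dict.mk (kv0 :: rest)).getD k []).count p : Int)))).sum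
        = (L.map (fun k => (if k = kv0.1 then (kv0.2.count p : Int) else 0)
            + (((PySem.Dict.mk rest).getD k []).count p : Int))).sum := by
          congr 1; exact List.map_congr_left (fun k _ => hpt k)
      _ = (L.map (fun k => if k = kv0.1 then (kv0.2.count p : Int) else 0)).sum
            + (L.map (fun k => ((((PySem.Dict.mk rest).getD k []).count p : Int)))).sum := by
          rw [← List.sum_map_add]
      _ = (if kv0.1 ∈ L then (kv0.2.count p : Int) else 0)
            + (rest.map (fun kv => if kv.1 ∈ L then (kv.2.count p : Int) else 0)).sum := by
          rw [sum_ite_eq_mem kv0.1 _ L hL, ih L hrest hL]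
      _ = ((kv0 :: rest).map (fun kv => if kv.1 ∈ L then (kv.2.count p : Int) else 0)).sum := by
          simp

-- A's filtered items scan equals B's 9-cell lookup sum.
theorem counts_eq (d : PySem.Dict (Int × Int) (List Int)) (hnd : d.keys.Nodup) (p r c : Int) :
    d.items.foldl (fun acc kv =>
        kv.2.foldl (fun a s =>
          if r ≤ kv.1.1 ∧ kv.1.1 ≤ r + 2 ∧ c ≤ kv.1.2 ∧ kv.1.2 ≤ c + 2 ∧ s = p
          then a + 1 else a) acc) 0
    = (PySem.List.pyRange r (r + 3) 1).foldl (fun acc x =>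
        (PySem.List.pyRange c (c + 3) 1).foldl (fun acc2 y =>
          acc2 + ((d.getD (x, y) []).count p : Int)) acc) 0 := by
  obtain ⟨l⟩ := d
  have hl : (l.map Prod.fst).Nodup := hnd
  set L9 : List (Int × Int) := [(r, c), (r, c+1), (r, c+2), (r+1, c), (r+1, c+1), (r+1, c+2), (r+2, c), (r+2, c+1), (r+2, c+2)] with hL9
  have hL9nd : L9.Nodup := by simp [hL9, List.nodup_cons, Prod.ext_iff]
  have hmem : ∀ k : Int × Int, k ∈ L9 ↔ (r ≤ k.1 ∧ k.1 ≤ r + 2 ∧ c ≤ k.2 ∧ k.2 ≤ c + 2) := by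
    intro k; simp [hL9, Prod.ext_iff]; omega
  have hfun : (fun (acc : Int) (kv : (Int × Int) × List Int) =>
        kv.2.foldl (fun a s =>
          if r ≤ kv.1.1 ∧ kv.1.1 ≤ r + 2 ∧ c ≤ kv.1.2 ∧ kv.1.2 ≤ c + 2 ∧ s = p
          then a + 1 else a) acc)
      = (fun acc kv => acc + if kv.1 ∈ L9 then (kv.2.count p : Int) else 0) := by
    funext acc kv
    by_cases hB : r ≤ kv.1.1 ∧ kv.1.1 ≤ r + 2 ∧ c ≤ kv.1.2 ∧ kv.1.2 ≤ c + 2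
    · obtain ⟨h1, h2, h3, h4⟩ := hB
      simp only [h1, h2, h3, h4, true_and]
      rw [PySem.List.foldl_ite_add_one]
      rw [if_pos ((hmem kv.1).mpr ⟨h1, h2, h3, h4⟩), List.count_eq_countP]
      simp only [Bool.beq_eq_decide_eq]
    · have hz : ∀ (a s : Int),
          (if r ≤ kv.1.1 ∧ kv.1.1 ≤ r + 2 ∧ c ≤ kv.1.2 ∧ kv.1.2 ≤ c + 2 ∧ s = p
           then a + 1 else a) = a := by
        intro a s; rw [if_neg]; tauto
      simp only [hz, List.foldl_fixed]
      rw [if_neg (fun h => hB ((hmem kv.1).mp h))]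
      omega
  rw [hfun, PySem.List.foldl_add]
  have hrange : ∀ a : Int, PySem.List.pyRange a (a + 3) 1 = [a, a + 1, a + 2] := by
    intro a
    rw [PySem.List.pyRange_one_cons (by omega), PySem.List.pyRange_one_cons (by omega),
        PySem.List.pyRange_one_cons (by omega), PySem.List.pyRange_one_eq_nil (by omega)]
    norm_num
    omega
  rw [hrange r, hrange c]
  rw [← sum_getD_eq_items p l L9 hl hL9nd]
  simp only [hL9, List.map_cons, List.map_nil, List.sum_cons, List.sum_nil,
    List.foldl_cons, List.foldl_nil]
  ring

-- ===== VERDICT (by name: the statement is the Claim_ definition above) =====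
theorem IsOnlySuggestionInSquare_spec : Claim_equal_IsOnlySuggestionInSquare := by
  intro poss p line col _hdom hpre
  obtain ⟨hl, hc⟩ := hpre
  unfold Spec_IsOnlySuggestionInSquare IsOnlySuggestionInSquare IsOnlySuggestionInSquare_alt
  rw [pvBlockLoop_start line hl, pvBlockLoop_start col hc]
  rw [PySem.Int.floordiv_eq_ediv_of_pos (by norm_num : (0:Int) < 3),
      PySem.Int.floordiv_eq_ediv_of_pos (by norm_num : (0:Int) < 3)]
  have e1 : line / 3 * 3 = 3 * (line / 3) := mul_comm _ _
  have e2 : col / 3 * 3 = 3 * (col / 3) := mul_comm _ _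
  rw [e1, e2]
  dsimp only
  rw [counts_eq _ (PySem.Dict.nodup_keys_ofList _) p (3 * (line / 3)) (3 * (col / 3))]
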